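-- pv_equiv track=rewrite | github.com/ARYANB1329/ENGINEERING-WORK-AND-ASSIGNMENTS | PAIR AND TRIPLES.py | solve
-- ===== SOURCE A (Python) =====
-- def solve(s):
--     d={}
--     for i in s:
--         if i not in d:
--             d[i]=1
--         else:
--             d[i]+=1
--     pair=False
--     for k in d:
--         if d[k]==2:
--             pair=True
--             d[k]-=2
--             break
--         elif (d[k]-2)%3==0:
--             pair=True
--             d[k]-=2
--             break
--     if pair==False:
--         return False
--     for k in d:
--         if d[k]%3!=0:
--             return False
--     return True
-- ===== SOURCE B (Python) =====
-- def solve(s):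
--     freq = {}
--     for ch in s:
--         freq[ch] = freq.get(ch, 0) + 1
--     rems = [c % 3 for c in freq.values()]
--     return rems.count(2) == 1 and rems.count(1) == 0
-- ===== Notes on version B (the rewrite author's own statement) =====
-- stated objective: simpler
-- what changed: Replaces A's two-phase find-first-pair-then-mutate-dict-then-verify loop with a single residue computation: build the frequency table, map each count to count % 3, and return True iff exactly one residue is 2 and none is 1; no dict mutation, no early exit, no second scan of a modified dict.
import Mathlib
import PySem

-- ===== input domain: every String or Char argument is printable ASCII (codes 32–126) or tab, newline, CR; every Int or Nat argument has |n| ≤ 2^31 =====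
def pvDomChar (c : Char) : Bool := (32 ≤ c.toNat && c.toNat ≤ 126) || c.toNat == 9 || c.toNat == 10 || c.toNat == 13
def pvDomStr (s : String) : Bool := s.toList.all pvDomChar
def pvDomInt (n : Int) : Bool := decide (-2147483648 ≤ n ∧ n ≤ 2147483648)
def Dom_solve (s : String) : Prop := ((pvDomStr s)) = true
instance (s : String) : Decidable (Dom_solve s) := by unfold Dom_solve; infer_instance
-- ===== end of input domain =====

-- B replaces A's find-first-pair/mutate/verify two-phase dict scan with a single
-- residue (count % 3) tally; objective: simpler, same cost.


-- ===== PORT A =====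
-- first loop: d={}; for i in s: if i not in d: d[i]=1 else: d[i]+=1
def solveBuild (s : String) : PySem.Dict Char Int :=
  s.toList.foldl
    (fun d i => if d.contains i = false then d.insert i 1 else d.insert i (d.getD i 0 + 1))
    PySem.Dict.empty

-- second loop: scan keys for the first k with d[k]==2 or (d[k]-2)%3==0; on hit, d[k]-=2 and break
def solveFind (d : PySem.Dict Char Int) : List Char → Option (PySem.Dict Char Int)
  | [] => none
  | k :: ks =>
    if d.getD k 0 == 2 then some (d.insert k (d.getD k 0 - 2))
    else if PySem.Int.mod (d.getD k 0 - 2) 3 == 0 then some (d.insert k (d.getD k 0 - 2))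
    else solveFind d ks

-- third loop: for k in d: if d[k]%3!=0: return False; return True
def solveCheck (d : PySem.Dict Char Int) : List Char → Bool
  | [] => true
  | k :: ks => if PySem.Int.mod (d.getD k 0) 3 != 0 then false else solveCheck d ks

def solve (s : String) : Bool :=
  let d := solveBuild s
  match solveFind d d.keys with
  | none => false           -- pair == False
  | some d' => solveCheck d' d'.keys

-- ===== PORT B =====
def solve_alt (s : String) : Bool :=
  let freq := s.toList.foldl (fun d ch => d.insert ch (d.getD ch 0 + 1)) PySem.Dict.empty
  let rems := freq.values.map (fun c => PySem.Int.mod c 3)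
  (PySem.List.count rems 2 == 1) && (PySem.List.count rems 1 == 0)

-- ===== PRECONDITION & SPEC =====
def Spec_solve (s : String) (out : Bool) : Prop := out = solve_alt s
instance (s : String) (out : Bool) : Decidable (Spec_solve s out) := by unfold Spec_solve; infer_instance

-- ===== CLAIM (what is proved, stated in full; the proofs are below) =====
def Claim_equal_solve : Prop := ∀ (s : String), Dom_solve s → Spec_solve s (solve s)

-- ===== LEMMAS AND PROOFS =====

-- a list's `all` only depends on the predicate's values on its members
lemma all_mem_congr {l : List Char} {p q : Char → Bool} (h : ∀ x ∈ l, p x = q x) :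
    l.all p = l.all q := by
  induction l with
  | nil => rfl
  | cons a t ih =>
    simp only [List.all_cons, h a (List.mem_cons_self),
      ih (fun x hx => h x (List.mem_cons_of_mem _ hx))]

-- A's two break conditions together are exactly "count % 3 == 2"
lemma cond_iff (v : Int) : (v = 2 ∨ (v - 2) % 3 = 0) ↔ v % 3 = 2 := by omega

lemma solveFind_eq_find? (d : PySem.Dict Char Int) (ks : List Char) :
    solveFind d ks
      = (ks.find? (fun k => d.getD k 0 % 3 == 2)).map
          (fun k => d.insert k (d.getD k 0 - 2)) := by
  induction ks with
  | nil => rfl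
  | cons k ks ih =>
    by_cases h2 : d.getD k 0 % 3 = 2
    · rw [List.find?_cons_of_pos (by simp [h2])]
      by_cases he : d.getD k 0 = 2
      · unfold solveFind
        rw [if_pos (beq_iff_eq.mpr he)]
        simp only [Option.map_some]
      · have hm : (d.getD k 0 - 2) % 3 = 0 := ((cond_iff _).mpr h2).resolve_left he
        unfold solveFind
        rw [if_neg (by simp [he]), if_pos (by simp [hm])]
        simp only [Option.map_some]
    · have hne : d.getD k 0 ≠ 2 := fun he => h2 ((cond_iff _).mp (Or.inl he))
      have hm : (d.getD k 0 - 2) % 3 ≠ 0 := fun hm => h2 ((cond_iff _).mp (Or.inr hm))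
      rw [List.find?_cons_of_neg (by simp [h2])]
      unfold solveFind
      rw [if_neg (by simp [hne]), if_neg (by simp [hm]), ih]

lemma solveCheck_eq_all (d : PySem.Dict Char Int) (ks : List Char) :
    solveCheck d ks = ks.all (fun k => d.getD k 0 % 3 == 0) := by
  induction ks with
  | nil => rfl
  | cons k ks ih =>
    unfold solveCheck
    by_cases h : d.getD k 0 % 3 = 0
    · rw [if_neg (by simp [h])]
      simp [h, ih]
    · rw [if_pos (by simp [h])]
      simp [h]

-- B's residue test, as a function of the key list and the count function
def specList (f : Char → Int) (l : List Char) : Bool :=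
  ((l.map (fun k => f k % 3)).count 2 == 1) &&
  ((l.map (fun k => f k % 3)).count 1 == 0)

-- all residues zero ↔ no residue 2 and no residue 1
lemma all_zero_iff_counts (f : Char → Int) (l : List Char) :
    l.all (fun j => f j % 3 == 0)
      = (((l.map (fun k => f k % 3)).count 2 == 0) &&
         ((l.map (fun k => f k % 3)).count 1 == 0)) := by
  induction l with
  | nil => rfl
  | cons k l ih =>
    simp only [List.all_cons, List.map_cons, List.count_cons, ih]
    by_cases h0 : f k % 3 = 0
    · simp [h0]
    · by_cases h1 : f k % 3 = 1
      · simp [h1]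
      · have h2 : f k % 3 = 2 := by omega
        simp [h2]

-- invariant of A's second+third loops against B's residue tally
lemma Ag_lemma (f : Char → Int) (pref l : List Char) (hnd : (pref ++ l).Nodup) :
    (match l.find? (fun k => f k % 3 == 2) with
     | none => false
     | some k =>
        (pref ++ l).all (fun j => (if j = k then f k - 2 else f j) % 3 == 0))
    = ((pref.all (fun j => f j % 3 == 0)) && specList f l) := by
  induction l generalizing pref with
  | nil => simp [specList]
  | cons k l ih =>
    by_cases h2 : f k % 3 = 2
    · -- found here: check everything; k's entry became f k - 2 with residue 0
      have hk0 : (f k - 2) % 3 = 0 := by omega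
      have hkp : k ∉ pref := fun hm =>
        (List.disjoint_of_nodup_append hnd) hm List.mem_cons_self
      have hkl : k ∉ l :=
        (List.nodup_cons.mp (List.nodup_append.mp hnd).2.1).1
      rw [List.find?_cons_of_pos (by simp [h2])]
      have hL : (pref ++ k :: l).all (fun j => (if j = k then f k - 2 else f j) % 3 == 0)
          = ((pref.all (fun j => f j % 3 == 0)) && l.all (fun j => f j % 3 == 0)) := by
        simp only [List.all_append, List.all_cons]
        rw [show pref.all (fun j => (if j = k then f k - 2 else f j) % 3 == 0)
              = pref.all (fun j => f j % 3 == 0) from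
            all_mem_congr (fun j hj => by
              simp [show j ≠ k from fun he => hkp (he ▸ hj)]),
            show l.all (fun j => (if j = k then f k - 2 else f j) % 3 == 0)
              = l.all (fun j => f j % 3 == 0) from
            all_mem_congr (fun j hj => by
              simp [show j ≠ k from fun he => hkl (he ▸ hj)])]
        simp [hk0]
      have hspec : specList f (k :: l)
          = (((l.map (fun k => f k % 3)).count 2 == 0) &&
             ((l.map (fun k => f k % 3)).count 1 == 0)) := by
        simp [specList, h2]
      show ((pref ++ k :: l).all fun j => (if j = k then f k - 2 else f j) % 3 == 0)
          = ((pref.all fun j => f j % 3 == 0) && specList f (k :: l))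
      rw [hL, all_zero_iff_counts, all_zero_iff_counts, hspec]
    · -- not found here: residue of k is 0 or 1, fold k into the prefix
      have hnd' : ((pref ++ [k]) ++ l).Nodup := by
        simpa [List.append_assoc] using hnd
      rw [List.find?_cons_of_neg (by simp [h2])]
      have hli : pref ++ k :: l = (pref ++ [k]) ++ l := by simp
      simp only [hli]
      rw [ih (pref ++ [k]) hnd']
      simp only [List.all_append, List.all_cons, List.all_nil, specList,
        List.map_cons, List.count_cons]
      by_cases h0 : f k % 3 = 0
      · simp [h0]
      · have h1 : f k % 3 = 1 := by omega
        simp [h1]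

lemma build_eq (s : String) : solveBuild s = PySem.Dict.counter s.toList := by
  have h : (fun (d : PySem.Dict Char Int) (i : Char) =>
        if d.contains i = false then d.insert i 1 else d.insert i (d.getD i 0 + 1))
      = (fun (d : PySem.Dict Char Int) (i : Char) => d.insert i (d.getD i 0 + 1)) := by
    funext d i
    by_cases hc : d.contains i
    · simp [hc]
    · have hc' : d.contains i = false := by simpa using hc
      simp [hc', PySem.Dict.getD_of_not_contains d 0 hc']
  unfold solveBuild
  rw [h, PySem.Dict.foldl_insert_getD_add_one_eq_counter]

-- ===== VERDICT (by name: the statement is the Claim_ definition above) =====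
theorem solve_spec : Claim_equal_solve := by
  intro s _
  unfold Spec_solve
  have hA : solve s = (match solveFind (solveBuild s) (solveBuild s).keys with
      | none => false
      | some d' => solveCheck d' d'.keys) := rfl
  have hBdef : solve_alt s =
      ((PySem.List.count (((s.toList.foldl (fun d ch => d.insert ch (d.getD ch 0 + 1))
          PySem.Dict.empty)).values.map (fun c => PySem.Int.mod c 3)) 2 == 1) &&
       (PySem.List.count (((s.toList.foldl (fun d ch => d.insert ch (d.getD ch 0 + 1))
          PySem.Dict.empty)).values.map (fun c => PySem.Int.mod c 3)) 1 == 0)) := rfl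
  rw [hA, hBdef, build_eq, PySem.Dict.foldl_insert_getD_add_one_eq_counter]
  set d := PySem.Dict.counter s.toList with hd
  have hnd : d.keys.Nodup := by rw [hd]; exact PySem.Dict.nodup_keys_counter s.toList
  have hvals : d.values = d.keys.map (fun k => d.getD k 0) :=
    PySem.Dict.values_eq_map_keys d hnd 0
  have hB : ((PySem.List.count (d.values.map (fun c => PySem.Int.mod c 3)) 2 == 1) &&
             (PySem.List.count (d.values.map (fun c => PySem.Int.mod c 3)) 1 == 0))
      = specList (fun k => d.getD k 0) d.keys := by
    simp [specList, hvals, List.map_map, Function.comp_def, PySem.List.count_eq]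
  rw [solveFind_eq_find?, hB]
  have main := Ag_lemma (fun k => d.getD k 0) [] d.keys (by simpa using hnd)
  beta_reduce at main
  simp only [List.nil_append, List.all_nil, Bool.true_and] at main
  cases hfind : d.keys.find? (fun k => d.getD k 0 % 3 == 2) with
  | none =>
    rw [hfind] at main
    simp only [Option.map_none]
    exact main.symm ▸ rfl
  | some k =>
    rw [hfind] at main
    have hkmem : k ∈ d.keys := List.mem_of_find?_eq_some hfind
    have hcont : d.contains k := (PySem.Dict.contains_iff_mem_keys d k).mpr hkmem
    simp only [Option.map_some]
    have hkeys' : (d.insert k (d.getD k 0 - 2)).keys = d.keys :=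
      PySem.Dict.keys_insert_of_contains d _ hcont
    rw [solveCheck_eq_all, hkeys']
    have hall : (d.keys.all (fun j => (d.insert k (d.getD k 0 - 2)).getD j 0 % 3 == 0))
        = (d.keys.all (fun j => (if j = k then d.getD k 0 - 2 else d.getD j 0) % 3 == 0)) := by
      apply all_mem_congr
      intro j _
      rw [PySem.Dict.getD_insert]
    have main' : (d.keys.all fun j => (if j = k then d.getD k 0 - 2 else d.getD j 0) % 3 == 0)
        = specList (fun k => d.getD k 0) d.keys := main
    rw [hall, main']
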